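-- pv_equiv track=rewrite | github.com/shasankp000/Lexis | compression/pipeline/stage5_encode.py | _decode_factoradic_unsigned
-- ===== SOURCE A (Python) =====
-- from math import factorial, sqrt
-- from typing import Dict, List, Tuple, TypedDict
--
-- def _decode_factoradic_unsigned(digits: List[int]) -> int:
--     """Decode factoriadic digits into a non-negative integer."""
--     if not digits:
--         return 0
--     total = 0
--     length = len(digits)
--     for idx, digit in enumerate(digits):
--         total += digit * factorial(length - 1 - idx)
--     return total
-- ===== SOURCE B (Python) =====
-- def _decode_factoradic_unsigned(digits):
--     """Decode factoriadic digits: right-to-left pass keeping a running factorial."""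
--     total = 0
--     fact = 1
--     k = 1
--     for d in reversed(digits):
--         total += d * fact
--         fact *= k
--         k += 1
--     return total
-- ===== Notes on version B (the rewrite author's own statement) =====
-- stated objective: faster
-- what changed: B walks the digits right-to-left with a running factorial accumulator (fact *= k each step) instead of A's per-digit factorial(length-1-idx) recomputation, so no factorial is ever recomputed.
import Mathlib
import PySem

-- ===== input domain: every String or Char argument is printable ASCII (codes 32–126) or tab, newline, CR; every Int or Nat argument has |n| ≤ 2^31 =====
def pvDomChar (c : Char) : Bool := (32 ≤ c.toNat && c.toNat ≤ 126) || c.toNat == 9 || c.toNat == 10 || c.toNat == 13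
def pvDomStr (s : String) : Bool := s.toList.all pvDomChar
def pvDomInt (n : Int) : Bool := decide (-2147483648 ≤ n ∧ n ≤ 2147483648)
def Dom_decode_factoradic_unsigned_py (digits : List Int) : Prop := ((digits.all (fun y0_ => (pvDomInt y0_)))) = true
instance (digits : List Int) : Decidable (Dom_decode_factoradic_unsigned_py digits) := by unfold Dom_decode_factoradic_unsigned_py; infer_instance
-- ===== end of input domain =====

-- B walks the digits right-to-left with a running factorial accumulator instead of
-- recomputing factorial(length-1-idx) per digit (faster).

-- ===== PORT A =====
-- port of A: sum of digit * factorial(length - 1 - idx) over enumerate(digits)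
def decode_factoradic_unsigned_py (digits : List Int) : Int :=
  if digits = [] then 0
  else
    let length : Int := digits.length
    (PySem.List.enumerate digits).foldl
      (fun total p => total + p.2 * (Nat.factorial (length - 1 - p.1).toNat : Int)) 0

-- ===== PORT B =====
-- port of B: for d in reversed(digits): total += d*fact; fact *= k; k += 1
def decode_factoradic_unsigned_py_alt (digits : List Int) : Int :=
  (digits.reverse.foldl
    (fun st d => (st.1 + d * st.2.1, st.2.1 * st.2.2, st.2.2 + 1))
    ((0 : Int), (1 : Int), (1 : Int))).1

-- ===== PRECONDITION & SPEC =====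
def Spec_decode_factoradic_unsigned_py (digits : List Int) (out : Int) : Prop := out = decode_factoradic_unsigned_py_alt digits
instance (digits : List Int) (out : Int) : Decidable (Spec_decode_factoradic_unsigned_py digits out) := by unfold Spec_decode_factoradic_unsigned_py; infer_instance

-- ===== CLAIM (what is proved, stated in full; the proofs are below) =====
def Claim_equal_decode_factoradic_unsigned_py : Prop := ∀ (digits : List Int), Dom_decode_factoradic_unsigned_py digits → Spec_decode_factoradic_unsigned_py digits (decode_factoradic_unsigned_py digits)

-- ===== LEMMAS AND PROOFS =====

-- common specification: factoradic value, recursing on the leading digit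
def pvS : List Int → Int
  | [] => 0
  | d :: ds => d * (Nat.factorial ds.length : Int) + pvS ds

-- weighted sum starting at factorial index k (describes B's accumulation order)
def pvT : List Int → Nat → Int
  | [], _ => 0
  | r :: rs, k => r * (Nat.factorial k : Int) + pvT rs (k + 1)

-- B's fold invariant
theorem pvFoldB (rs : List Int) (t : Int) (k : Nat) :
    rs.foldl (fun st d => (st.1 + d * st.2.1, st.2.1 * st.2.2, st.2.2 + 1))
      (t, (Nat.factorial k : Int), ((k : Int) + 1))
    = (t + pvT rs k, (Nat.factorial (k + rs.length) : Int), ((k : Int) + 1 + rs.length)) := by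
  induction rs generalizing t k with
  | nil => simp [pvT]
  | cons r rs ih =>
    simp only [List.foldl_cons]
    have hf : (Nat.factorial k : Int) * ((k : Int) + 1) = (Nat.factorial (k + 1) : Int) := by
      rw [Nat.factorial_succ]; push_cast; ring
    rw [hf]
    have h := ih (t + r * (Nat.factorial k : Int)) (k + 1)
    push_cast at h ⊢
    rw [h]
    simp only [pvT, List.length_cons, Prod.mk.injEq]
    refine ⟨by ring, ?_, by push_cast; ring⟩
    congr 2
    omega

theorem pvT_append (xs : List Int) (d : Int) (k : Nat) :
    pvT (xs ++ [d]) k = pvT xs k + d * (Nat.factorial (k + xs.length) : Int) := by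
  induction xs generalizing k with
  | nil => simp [pvT]
  | cons x xs ih =>
    simp only [pvT, List.cons_append, List.length_cons, ih]
    have hk : k + 1 + xs.length = k + (xs.length + 1) := by omega
    rw [hk]; ring

theorem pvS_eq_T (l : List Int) : pvS l = pvT l.reverse 0 := by
  induction l with
  | nil => rfl
  | cons d ds ih => simp [pvS, List.reverse_cons, pvT_append, ih]; ring

-- A's fold computes pvS, tracking the start index of enumerate
theorem pvFoldA (L : Int) (ds : List Int) (s : Int) (acc : Int)
    (h : s + (ds.length : Int) = L) (hs : 0 ≤ s) :
    (PySem.List.enumerate ds s).foldl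
      (fun total p => total + p.2 * (Nat.factorial (L - 1 - p.1).toNat : Int)) acc
    = acc + pvS ds := by
  induction ds generalizing s acc with
  | nil => simp [PySem.List.enumerate_nil, pvS]
  | cons d ds ih =>
    simp only [PySem.List.enumerate_cons, List.foldl_cons]
    have hlen : s + 1 + (ds.length : Int) = L := by simp only [List.length_cons] at h; omega
    rw [ih (s + 1) _ hlen (by omega)]
    have : (L - 1 - s).toNat = ds.length := by omega
    simp [this, pvS]; ring

-- ===== VERDICT (by name: the statement is the Claim_ definition above) =====
theorem decode_factoradic_unsigned_py_spec : Claim_equal_decode_factoradic_unsigned_py := by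
  intro digits _
  unfold Spec_decode_factoradic_unsigned_py decode_factoradic_unsigned_py decode_factoradic_unsigned_py_alt
  have h := pvFoldB digits.reverse 0 0
  simp only [Nat.factorial, Nat.cast_zero, Nat.cast_one, zero_add] at h
  rw [h, ← pvS_eq_T]
  by_cases hd : digits = []
  · subst hd; simp [pvS]
  · simp only [if_neg hd]
    rw [pvFoldA (digits.length : Int) digits 0 0 (by simp) le_rfl]
    simp
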